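-- pv_equiv track=rewrite | github.com/tomilov-dev/DSA | algorithms/dynamic_programming/climbing_stairs_ksteps_dp.py | climb_stairs_ksteps_paths_optimized
-- ===== SOURCE A (Python) =====
-- def climb_stairs_ksteps_paths_optimized(
--     stairs: int,
--     k: int,
-- ) -> int:
--     if stairs == 0:
--         return 1
--     elif stairs == 1:
--         return 1
--
--     dp = [0] * k
--     dp[0] = 1
--
--     for i in range(1, stairs + 1):
--         for j in range(1, k):
--             if i - j < 0:
--                 continue
--
--             dp[i % k] += dp[(i - j) % k]
--
--     return dp[stairs % k]
-- ===== SOURCE B (Python) =====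
-- def climb_stairs_ksteps_paths_optimized(
--     stairs: int,
--     k: int,
-- ) -> int:
--     # O(stairs) sliding-window sum instead of A's O(stairs*k) ring buffer.
--     # For stairs < 0 this counts 0 paths (A accidentally returns 1 when k divides stairs).
--     if stairs <= 1:
--         return 1 if stairs >= 0 else 0
--     hist = [1]
--     window = 1
--     for i in range(1, stairs + 1):
--         cur = window
--         hist.append(cur)
--         window += cur
--         if i - k >= 0:
--             window -= hist[i - k]
--     return hist[stairs]
-- ===== Notes on version B (the rewrite author's own statement) =====
-- stated objective: faster
-- what changed: Replaces A's O(stairs*k) ring-buffer double loop (k-1 additions per stair) by an O(stairs) sliding-window running sum over an explicit history list, and returns 0 for negative stairs instead of A's accidental ring-buffer value.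
-- intended difference: For stairs < 0 with k dividing stairs, A returns 1 (the untouched dp[0]=1 slot read back through Python's modular indexing) while B returns the intended 0: there are no paths to a negative stair. — e.g. on climb_stairs_ksteps_paths_optimized(-3, 3): A returns 1, B returns 0
import Mathlib
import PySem

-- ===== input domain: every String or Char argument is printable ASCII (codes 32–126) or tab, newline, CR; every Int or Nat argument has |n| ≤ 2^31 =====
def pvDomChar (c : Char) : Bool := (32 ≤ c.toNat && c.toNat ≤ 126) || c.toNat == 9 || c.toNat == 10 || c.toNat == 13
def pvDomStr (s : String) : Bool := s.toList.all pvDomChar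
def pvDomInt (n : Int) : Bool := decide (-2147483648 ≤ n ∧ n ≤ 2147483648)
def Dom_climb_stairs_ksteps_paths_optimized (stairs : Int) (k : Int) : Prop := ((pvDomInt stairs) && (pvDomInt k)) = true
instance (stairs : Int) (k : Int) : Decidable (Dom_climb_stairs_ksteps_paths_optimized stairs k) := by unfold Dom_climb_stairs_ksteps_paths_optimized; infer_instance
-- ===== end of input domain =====

-- B replaces A's O(stairs*k) ring-buffer double loop by an O(stairs) sliding-window running
-- sum (objective: faster); for stairs < 0 with k ∣ stairs A accidentally returns 1, B returns 0 (see D_).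

-- ===== PORT A =====
-- inner loop body: dp[i % k] += dp[(i - j) % k]  (skipped when i - j < 0)
def pvStepAInner (k i : Int) (dp : List Int) (j : Int) : List Int :=
  if i - j < 0 then dp
  else PySem.List.pySetD dp (PySem.Int.mod i k)
    (PySem.List.pyGetD dp (PySem.Int.mod i k) 0 + PySem.List.pyGetD dp (PySem.Int.mod (i - j) k) 0)

-- body of 'for i in …': for j in range(1, k): …
def pvStepA (k : Int) (dp : List Int) (i : Int) : List Int :=
  (PySem.List.pyRange 1 k 1).foldl (pvStepAInner k i) dp

def climb_stairs_ksteps_paths_optimized (stairs : Int) (k : Int) : Int :=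
  if stairs = 0 then 1
  else if stairs = 1 then 1
  else
    -- dp = [0] * k; dp[0] = 1
    let dp0 : List Int := PySem.List.pySetD (List.replicate k.toNat 0) 0 1
    let dp := (PySem.List.pyRange 1 (stairs + 1) 1).foldl (pvStepA k) dp0
    PySem.List.pyGetD dp (PySem.Int.mod stairs k) 0

-- ===== PORT B =====
-- body of B's single loop: append cur = window; slide the window sum
def pvStepB (k : Int) (st : List Int × Int) (i : Int) : List Int × Int :=
  let cur := st.2
  let hist := st.1 ++ [cur]
  let w := st.2 + cur
  (hist, if 0 ≤ i - k then w - PySem.List.pyGetD hist (i - k) 0 else w)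

def climb_stairs_ksteps_paths_optimized_alt (stairs : Int) (k : Int) : Int :=
  if stairs ≤ 1 then (if 0 ≤ stairs then 1 else 0)
  else
    let st := (PySem.List.pyRange 1 (stairs + 1) 1).foldl (pvStepB k) ([1], 1)
    PySem.List.pyGetD st.1 stairs 0

-- ===== PRECONDITION & SPEC =====
-- Pre_ excludes only inputs where A raises: with stairs ∉ {0, 1} and k ≤ 0, dp = [0]*k is empty
-- and dp[0] = 1 raises IndexError.
def Pre_climb_stairs_ksteps_paths_optimized (stairs : Int) (k : Int) : Prop :=
  stairs = 0 ∨ stairs = 1 ∨ 1 ≤ k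
instance (stairs : Int) (k : Int) : Decidable (Pre_climb_stairs_ksteps_paths_optimized stairs k) := by unfold Pre_climb_stairs_ksteps_paths_optimized; infer_instance
def pvWitness_climb_stairs_ksteps_paths_optimized : Int × Int := (5, 2)

-- For stairs < 0 with k ∣ stairs, A returns 1 (the untouched dp[0]=1 slot read back through
-- Python's modular indexing) while B returns the intended 0: no paths reach a negative stair.
def D_climb_stairs_ksteps_paths_optimized (stairs : Int) (k : Int) : Prop :=
  stairs < 0 ∧ k ∣ stairs
instance (stairs : Int) (k : Int) : Decidable (D_climb_stairs_ksteps_paths_optimized stairs k) := by unfold D_climb_stairs_ksteps_paths_optimized; infer_instance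

def Spec_climb_stairs_ksteps_paths_optimized (stairs : Int) (k : Int) (out : Int) : Prop :=
  ¬ D_climb_stairs_ksteps_paths_optimized stairs k → out = climb_stairs_ksteps_paths_optimized_alt stairs k
instance (stairs : Int) (k : Int) (out : Int) : Decidable (Spec_climb_stairs_ksteps_paths_optimized stairs k out) := by unfold Spec_climb_stairs_ksteps_paths_optimized; infer_instance

def pvDiffWitness_climb_stairs_ksteps_paths_optimized : Int × Int := (-3, 3)
def pvDiffWitnessOut_climb_stairs_ksteps_paths_optimized : Int × Int := (1, 0)

-- ===== CLAIM (what is proved, stated in full; the proofs are below) =====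
def Claim_unchanged_climb_stairs_ksteps_paths_optimized : Prop := ∀ (stairs : Int) (k : Int), Dom_climb_stairs_ksteps_paths_optimized stairs k → Pre_climb_stairs_ksteps_paths_optimized stairs k → Spec_climb_stairs_ksteps_paths_optimized stairs k (climb_stairs_ksteps_paths_optimized stairs k)
def Claim_changed_climb_stairs_ksteps_paths_optimized : Prop := Dom_climb_stairs_ksteps_paths_optimized (pvDiffWitness_climb_stairs_ksteps_paths_optimized.1) (pvDiffWitness_climb_stairs_ksteps_paths_optimized.2) ∧ Pre_climb_stairs_ksteps_paths_optimized (pvDiffWitness_climb_stairs_ksteps_paths_optimized.1) (pvDiffWitness_climb_stairs_ksteps_paths_optimized.2) ∧ D_climb_stairs_ksteps_paths_optimized (pvDiffWitness_climb_stairs_ksteps_paths_optimized.1) (pvDiffWitness_climb_stairs_ksteps_paths_optimized.2) ∧ climb_stairs_ksteps_paths_optimized (pvDiffWitness_climb_stairs_ksteps_paths_optimized.1) (pvDiffWitness_climb_stairs_ksteps_paths_optimized.2) = pvDiffWitnessOut_climb_stairs_ksteps_paths_optimized.1 ∧ climb_stairs_ksteps_paths_optimized_alt (pvDiffWitness_climb_stairs_ksteps_paths_optimized.1)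 (pvDiffWitness_climb_stairs_ksteps_paths_optimized.2) = pvDiffWitnessOut_climb_stairs_ksteps_paths_optimized.2 ∧ pvDiffWitnessOut_climb_stairs_ksteps_paths_optimized.1 ≠ pvDiffWitnessOut_climb_stairs_ksteps_paths_optimized.2
def Claim_exact_climb_stairs_ksteps_paths_optimized : Prop := ∀ (stairs : Int) (k : Int), Dom_climb_stairs_ksteps_paths_optimized stairs k → Pre_climb_stairs_ksteps_paths_optimized stairs k → D_climb_stairs_ksteps_paths_optimized stairs k → climb_stairs_ksteps_paths_optimized stairs k ≠ climb_stairs_ksteps_paths_optimized_alt stairs k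

-- ===== LEMMAS AND PROOFS =====

-- iterate a loop body over i = 1, 2, …, n
def pvIter {α : Type} (F : α → Int → α) (init : α) : Nat → α
  | 0 => init
  | m + 1 => F (pvIter F init m) ((m : Int) + 1)

lemma pv_foldl_pyRange_iter {α : Type} (F : α → Int → α) (init : α) (n : Nat) :
    (PySem.List.pyRange 1 ((n : Int) + 1) 1).foldl F init = pvIter F init n := by
  induction n with
  | zero => rw [PySem.List.pyRange_one_eq_nil (by norm_num)]; rfl
  | succ m ih =>
      rw [show ((m + 1 : Nat) : Int) + 1 = ((m : Int) + 1) + 1 by push_cast; ring,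
        PySem.List.pyRange_one_succ_right (by omega), List.foldl_append, ih]
      rfl

-- modular arithmetic facts (k > 0)
lemma pv_mod_bounds (i k : Int) (hk : 0 < k) :
    0 ≤ PySem.Int.mod i k ∧ PySem.Int.mod i k < k := by
  rw [PySem.Int.mod_eq_emod_of_pos hk]
  exact ⟨Int.emod_nonneg i (by omega), Int.emod_lt_of_pos i hk⟩

lemma pv_mod_eq_iff (a b k : Int) (hk : 0 < k) :
    PySem.Int.mod a k = PySem.Int.mod b k ↔ k ∣ (a - b) := by
  rw [PySem.Int.mod_eq_emod_of_pos hk, PySem.Int.mod_eq_emod_of_pos hk]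
  exact Int.emod_eq_emod_iff_emod_sub_eq_zero.trans (PySem.Int.emod_eq_zero_iff_dvd _ _)

lemma pv_mod_small (a k : Int) (hk : 0 < k) (h1 : 0 ≤ a) (h2 : a < k) :
    PySem.Int.mod a k = a := by
  rw [PySem.Int.mod_eq_emod_of_pos hk]; exact Int.emod_eq_of_lt h1 h2

lemma pv_mod_eq_of (a b k : Int) (hk : 0 < k) (hd : k ∣ (a - b)) (h1 : 0 ≤ b) (h2 : b < k) :
    PySem.Int.mod a k = b := by
  rw [(pv_mod_eq_iff a b k hk).mpr hd]; exact pv_mod_small b k hk h1 h2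

lemma pv_dvd_sub_mod (i k : Int) (hk : 0 < k) : k ∣ (i - PySem.Int.mod i k) := by
  rw [PySem.Int.mod_eq_emod_of_pos hk]
  have h := Int.mul_ediv_add_emod i k
  exact ⟨i / k, by omega⟩

lemma pv_s_ne_t (i j k : Int) (hk : 0 < k) (h1 : 1 ≤ j) (h2 : j < k) :
    (PySem.Int.mod (i - j) k).toNat ≠ (PySem.Int.mod i k).toNat := by
  intro h
  have hb1 := pv_mod_bounds (i - j) k hk
  have hb2 := pv_mod_bounds i k hk
  have heq : PySem.Int.mod (i - j) k = PySem.Int.mod i k := by omega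
  have hdvd : k ∣ (i - j - i) := (pv_mod_eq_iff _ _ _ hk).mp heq
  have hj' : k ∣ j := by
    rw [show i - j - i = -j by ring, dvd_neg] at hdvd; exact hdvd
  have := Int.le_of_dvd (by omega) hj'
  omega

lemma pv_getD_set_ne (dp : List Int) (t s : Nat) (v : Int) (hne : s ≠ t) :
    (dp.set t v).getD s 0 = dp.getD s 0 := by
  simp [List.getD, List.getElem?_set_ne (Ne.symm hne)]

lemma pv_getD_set_self (dp : List Int) (t : Nat) (v : Int) (h : t < dp.length) :
    (dp.set t v).getD t 0 = v := by
  simp [List.getD, h]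

-- A's inner 'for j in range(1, k)' loop: it only ever writes slot t = i % k and reads
-- slots (i - j) % k ≠ t, so it amounts to a single set of slot t to old value + sum of reads
lemma pv_inner_fold (k i : Int) (hk : 0 < k) (js : List Int)
    (hjs : ∀ j ∈ js, 1 ≤ j ∧ j < k) (dp : List Int) (hlen : dp.length = k.toNat) :
    js.foldl (pvStepAInner k i) dp
    = dp.set (PySem.Int.mod i k).toNat
        (dp.getD (PySem.Int.mod i k).toNat 0
         + ((js.filter (fun j => decide (0 ≤ i - j))).map
              (fun j => dp.getD (PySem.Int.mod (i - j) k).toNat 0)).sum) := by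
  induction js generalizing dp with
  | nil =>
      simp only [List.foldl_nil, List.filter_nil, List.map_nil, List.sum_nil, add_zero]
      have ht : (PySem.Int.mod i k).toNat < dp.length := by
        have := pv_mod_bounds i k hk; omega
      rw [List.getD_eq_getElem dp 0 ht]; exact (List.set_getElem_self ht).symm
  | cons j rest ih =>
      have hj := hjs j (List.mem_cons_self)
      have hrest : ∀ x ∈ rest, 1 ≤ x ∧ x < k := fun x hx => hjs x (List.mem_cons_of_mem _ hx)
      have ht : (PySem.Int.mod i k).toNat < dp.length := by
        have := pv_mod_bounds i k hk; omega
      by_cases hneg : i - j < 0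
      · rw [List.foldl_cons, show pvStepAInner k i dp j = dp from by simp [pvStepAInner, hneg],
          ih hrest dp hlen, List.filter_cons, if_neg (by simp; omega)]
      · have hs : 0 ≤ PySem.Int.mod (i - j) k := (pv_mod_bounds (i - j) k hk).1
        have hstep : pvStepAInner k i dp j
            = dp.set (PySem.Int.mod i k).toNat
                (dp.getD (PySem.Int.mod i k).toNat 0 + dp.getD (PySem.Int.mod (i - j) k).toNat 0) := by
          rw [pvStepAInner, if_neg hneg,
            PySem.List.pySetD_of_nonneg _ _ (pv_mod_bounds i k hk).1,
            PySem.List.pyGetD_of_nonneg _ _ (pv_mod_bounds i k hk).1,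
            PySem.List.pyGetD_of_nonneg _ _ hs]
        set t := (PySem.Int.mod i k).toNat
        set v := dp.getD t 0 + dp.getD (PySem.Int.mod (i - j) k).toNat 0 with hv
        rw [List.foldl_cons, hstep, ih hrest (dp.set t v) (by simpa using hlen)]
        have hgt : (dp.set t v).getD t 0 = v := pv_getD_set_self dp t v ht
        have hmap : ((rest.filter (fun j => decide (0 ≤ i - j))).map
              (fun j' => (dp.set t v).getD (PySem.Int.mod (i - j') k).toNat 0))
            = ((rest.filter (fun j => decide (0 ≤ i - j))).map
              (fun j' => dp.getD (PySem.Int.mod (i - j') k).toNat 0)) := by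
          apply List.map_congr_left
          intro x hx
          have hxr := hrest x (List.mem_of_mem_filter hx)
          exact pv_getD_set_ne dp t _ v (pv_s_ne_t i x k hk hxr.1 hxr.2)
        rw [hgt, hmap, List.set_set, List.filter_cons, if_pos (by simp; omega), List.map_cons,
          List.sum_cons, hv]
        ring_nf

lemma pv_sum_filter (p : Int → Bool) (g : Int → Int) (l : List Int)
    (h : ∀ x ∈ l, p x = false → g x = 0) :
    ((l.filter p).map g).sum = (l.map g).sum := by
  induction l with
  | nil => rfl
  | cons a l ih =>
      rw [List.filter_cons]
      have ih' := ih (fun x hx => h x (List.mem_cons_of_mem _ hx))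
      by_cases hp : p a
      · simp [hp, ih']
      · have h0 := h a List.mem_cons_self (by simpa using hp)
        simp [hp, ih', h0]

-- history value with 0 outside the left edge
def pvH (hist : List Int) (t : Int) : Int := if t < 0 then 0 else hist.getD t.toNat 0

lemma pvH_append (hist : List Int) (c : Int) (t : Int) (h : t < (hist.length : Int)) :
    pvH (hist ++ [c]) t = pvH hist t := by
  unfold pvH
  by_cases ht : t < 0
  · simp [ht]
  · have : t.toNat < hist.length := by omega
    simp [ht, List.getD, List.getElem?_append_left this]

lemma pvH_append_last (hist : List Int) (c : Int) :
    pvH (hist ++ [c]) ((hist.length : Int)) = c := by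
  unfold pvH
  simp [List.getD]

-- sum of the k window values ending at index m
def pvWin (k : Int) (hist : List Int) (m : Int) : Int :=
  ((List.range k.toNat).map (fun (j : Nat) => pvH hist (m - (j : Int)))).sum

lemma pvWin_append (k : Int) (hist : List Int) (c : Int) (m : Int) (h : m < (hist.length : Int)) :
    pvWin k (hist ++ [c]) m = pvWin k hist m := by
  unfold pvWin
  congr 1
  apply List.map_congr_left
  intro j _
  have hj0 : (0 : Int) ≤ (j : Int) := Int.natCast_nonneg j
  exact pvH_append hist c _ (by omega)

lemma pvWin_succ (k : Int) (hk : 1 ≤ k) (hist : List Int) (m : Int) :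
    pvWin k hist (m + 1) = pvH hist (m + 1) + pvWin k hist m - pvH hist (m + 1 - k) := by
  have hK : k.toNat = (k.toNat - 1) + 1 := by omega
  have hcast : ((k.toNat - 1 : Nat) : Int) = k - 1 := by omega
  unfold pvWin
  conv_lhs => rw [hK, List.range_succ_eq_map]
  conv_rhs => rw [hK, List.range_succ]
  simp only [List.map_cons, List.map_append, List.map_map, List.sum_cons, List.sum_append,
    List.map_nil, List.sum_nil]
  have h1 : (List.range (k.toNat - 1)).map ((fun (j : Nat) => pvH hist (m + 1 - (j : Int))) ∘ Nat.succ)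
      = (List.range (k.toNat - 1)).map (fun (j : Nat) => pvH hist (m - (j : Int))) := by
    apply List.map_congr_left; intro a _
    simp only [Function.comp]
    congr 1
    push_cast
    ring
  rw [h1, hcast]
  have h2 : m - (k - 1) = m + 1 - k := by ring
  rw [h2]
  norm_num
  ring

def pvB (k : Int) (m : Nat) : List Int × Int := pvIter (pvStepB k) ([1], 1) m
def pvA (k : Int) (m : Nat) : List Int :=
  pvIter (pvStepA k) (PySem.List.pySetD (List.replicate k.toNat 0) 0 1) m

-- the joint loop invariant: B's window is the sliding k-sum of its history, and A's ring
-- buffer holds, in slot r, the history value at the latest index ≤ m congruent to r mod k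
lemma pv_inv (k : Int) (hk : 1 ≤ k) (m : Nat) :
    (pvB k m).1.length = m + 1
    ∧ (pvB k m).2 = pvWin k (pvB k m).1 (m : Int)
    ∧ pvA k m = (List.range k.toNat).map
        (fun (r : Nat) => pvH (pvB k m).1 ((m : Int) - PySem.Int.mod ((m : Int) - (r : Int)) k)) := by
  have hk0 : (0 : Int) < k := by omega
  have hKk : ((k.toNat : Int)) = k := Int.toNat_of_nonneg (by omega)
  have hK1 : k.toNat = (k.toNat - 1) + 1 := by omega
  induction m with
  | zero =>
      refine ⟨rfl, ?_, ?_⟩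
      · show (1 : Int) = pvWin k [1] 0
        unfold pvWin
        conv_rhs => rw [hK1, List.range_succ_eq_map]
        rw [List.map_cons, List.sum_cons, List.map_map]
        have hz : ((List.range (k.toNat - 1)).map
            ((fun (j : Nat) => pvH [1] (0 - (j : Int))) ∘ Nat.succ)).sum = 0 := by
          apply List.sum_eq_zero
          intro x hx
          simp only [List.mem_map] at hx
          obtain ⟨a, -, rfl⟩ := hx
          simp only [Function.comp]
          unfold pvH
          rw [if_pos (by push_cast; omega)]
        rw [hz]
        unfold pvH
        norm_num [List.getD]
      · show pvA k 0 = _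
        unfold pvA pvIter
        rw [PySem.List.pySetD_of_nonneg _ _ (by norm_num)]
        apply List.ext_getElem (by simp)
        intro n hn hn'
        simp only [List.length_set, List.length_replicate] at hn
        rw [List.getElem_set, List.getElem_map, List.getElem_range]
        by_cases h0 : n = 0
        · subst h0
          rw [if_pos (by norm_num)]
          have hm0 : PySem.Int.mod 0 k = 0 := pv_mod_small 0 k hk0 le_rfl hk0
          simp [pvB, pvIter, hm0, pvH, List.getD]
        · rw [if_neg (by omega), List.getElem_replicate]
          have hmod : PySem.Int.mod (((0:Nat):Int) - (n:Int)) k = k - (n:Int) := by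
            apply pv_mod_eq_of _ _ _ hk0 ⟨-1, by push_cast; ring⟩ (by omega) (by omega)
          rw [hmod]
          unfold pvH
          rw [if_pos (by omega)]
  | succ m ih =>
      obtain ⟨ih1, ih2, ih3⟩ := ih
      set hist := (pvB k m).1 with hhist
      set w := (pvB k m).2 with hw
      set i : Int := (m : Int) + 1 with hi
      have hstep : pvB k (m+1) = (hist ++ [w],
          if 0 ≤ i - k then w + w - PySem.List.pyGetD (hist ++ [w]) (i - k) 0
          else w + w) := by
        show pvStepB k (pvB k m) ((m : Int) + 1) = _
        rw [← hi]; rfl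
      have hlenI : ((hist.length : Int)) = (m : Int) + 1 := by rw [ih1]; push_cast; ring_nf
      have hcast2 : ((m + 1 : Nat) : Int) = i := by rw [hi]; omega
      have hwin : pvWin k (hist ++ [w]) i = w + w - pvH hist (i - k) := by
        rw [hi, pvWin_succ k hk _ (m : Int),
          pvWin_append _ _ _ _ (by omega), ← ih2,
          show (m : Int) + 1 = ((hist.length : Int)) by omega, pvH_append_last,
          pvH_append _ _ _ (by omega)]
      have h1' : (pvB k (m+1)).1.length = (m+1) + 1 := by
        rw [hstep]; simpa using ih1
      refine ⟨h1', ?_, ?_⟩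
      · rw [hstep]
        show (if 0 ≤ i - k then w + w - PySem.List.pyGetD (hist ++ [w]) (i - k) 0 else w + w)
          = pvWin k (hist ++ [w]) ((m+1 : Nat) : Int)
        rw [hcast2, hwin]
        split_ifs with hif
        · have hg : PySem.List.pyGetD (hist ++ [w]) (i - k) 0 = pvH (hist ++ [w]) (i - k) := by
            rw [pvH, if_neg (by omega), PySem.List.pyGetD_of_nonneg _ _ hif]
          rw [hg, pvH_append _ _ _ (by omega)]
        · rw [pvH, if_pos (by omega)]
          ring
      · -- the A side
        have hlenA : (pvA k m).length = k.toNat := by rw [ih3]; simp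
        have hA : ∀ (n : Nat), n < k.toNat → (pvA k m).getD n 0
            = pvH hist ((m : Int) - PySem.Int.mod ((m : Int) - (n : Int)) k) := by
          intro n hn
          rw [ih3]
          exact PySem.List.getD_map_range _ _ _ _ hn
        have hteq : ((PySem.Int.mod i k).toNat : Int) = PySem.Int.mod i k :=
          Int.toNat_of_nonneg (pv_mod_bounds i k hk0).1
        have htK : (PySem.Int.mod i k).toNat < k.toNat := by
          have := pv_mod_bounds i k hk0; omega
        have hstepA : pvA k (m+1) = (pvA k m).set (PySem.Int.mod i k).toNat
            ((pvA k m).getD (PySem.Int.mod i k).toNat 0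
             + (((PySem.List.pyRange 1 k 1).filter (fun j => decide (0 ≤ i - j))).map
                  (fun j => (pvA k m).getD (PySem.Int.mod (i - j) k).toNat 0)).sum) := by
          show pvStepA k (pvA k m) i = _
          rw [pvStepA]
          exact pv_inner_fold k i hk0 _ (fun j hj => by
            rw [PySem.List.mem_pyRange_one] at hj; exact ⟨hj.1, hj.2⟩) _ hlenA
        have hXt : (pvA k m).getD (PySem.Int.mod i k).toNat 0 = pvH hist (i - k) := by
          rw [hA _ htK]
          congr 1
          have hmt : PySem.Int.mod ((m : Int) - ((PySem.Int.mod i k).toNat : Int)) k = k - 1 := by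
            apply pv_mod_eq_of _ _ _ hk0 _ (by omega) (by omega)
            rw [hteq]
            have hdd : (m : Int) - PySem.Int.mod i k - (k - 1) = (i - PySem.Int.mod i k) - k := by
              rw [hi]; ring
            rw [hdd]
            exact dvd_sub (pv_dvd_sub_mod i k hk0) ⟨1, by ring⟩
          rw [hmt, hi]; ring
        have hSmap : (((PySem.List.pyRange 1 k 1).filter (fun j => decide (0 ≤ i - j))).map
                  (fun j => (pvA k m).getD (PySem.Int.mod (i - j) k).toNat 0))
            = (((PySem.List.pyRange 1 k 1).filter (fun j => decide (0 ≤ i - j))).map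
                  (fun j => pvH hist (i - j))) := by
          apply List.map_congr_left
          intro j hj
          have hjr := (PySem.List.mem_pyRange_one).mp (List.mem_of_mem_filter hj)
          have hsb := pv_mod_bounds (i - j) k hk0
          have hseq : ((PySem.Int.mod (i - j) k).toNat : Int) = PySem.Int.mod (i - j) k :=
            Int.toNat_of_nonneg hsb.1
          rw [hA _ (by omega)]
          congr 1
          have hms : PySem.Int.mod ((m : Int) - ((PySem.Int.mod (i - j) k).toNat : Int)) k
              = j - 1 := by
            apply pv_mod_eq_of _ _ _ hk0 _ (by omega) (by omega)
            rw [hseq]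
            have hdd : (m : Int) - PySem.Int.mod (i - j) k - (j - 1)
                = (i - j) - PySem.Int.mod (i - j) k := by rw [hi]; ring
            rw [hdd]
            exact pv_dvd_sub_mod (i - j) k hk0
          rw [hms, hi]; ring
        have hSfull : (((PySem.List.pyRange 1 k 1).filter (fun j => decide (0 ≤ i - j))).map
                  (fun j => pvH hist (i - j))).sum
            = ((PySem.List.pyRange 1 k 1).map (fun j => pvH hist (i - j))).sum := by
          apply pv_sum_filter
          intro x _ hx
          rw [pvH, if_pos (by simp at hx; omega)]
        have hSre : ((PySem.List.pyRange 1 k 1).map (fun j => pvH hist (i - j))).sum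
            = ((List.range (k.toNat - 1)).map (fun (a : Nat) => pvH hist ((m : Int) - (a : Int)))).sum := by
          rw [PySem.List.pyRange_one 1 k, List.map_map,
            show (k - 1).toNat = k.toNat - 1 by omega]
          congr 1
          apply List.map_congr_left
          intro a _
          simp only [Function.comp]
          congr 1
          rw [hi]
          ring
        have hwinsplit : pvWin k hist (m : Int)
            = ((List.range (k.toNat - 1)).map (fun (a : Nat) => pvH hist ((m : Int) - (a : Int)))).sum
              + pvH hist (i - k) := by
          unfold pvWin
          conv_lhs => rw [hK1, List.range_succ]
          rw [List.map_append, List.sum_append]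
          simp only [List.map_cons, List.map_nil, List.sum_cons, List.sum_nil]
          rw [show ((k.toNat - 1 : Nat) : Int) = k - 1 by omega,
            show (m : Int) - (k - 1) = i - k by rw [hi]; ring]
          ring
        have hV : (pvA k m).getD (PySem.Int.mod i k).toNat 0
             + (((PySem.List.pyRange 1 k 1).filter (fun j => decide (0 ≤ i - j))).map
                  (fun j => (pvA k m).getD (PySem.Int.mod (i - j) k).toNat 0)).sum = w := by
          rw [hXt, hSmap, hSfull, hSre, ih2, hwinsplit]
          ring
        rw [hstepA, hstep, hV]
        apply List.ext_getElem (by simp [hlenA])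
        intro n hn hn'
        have hnK : n < k.toNat := by simpa [hlenA] using hn
        have hnA : n < (pvA k m).length := by omega
        rw [List.getElem_set, List.getElem_map, List.getElem_range, hcast2]
        by_cases hcase : (PySem.Int.mod i k).toNat = n
        · rw [if_pos hcase]
          have h0 : PySem.Int.mod (i - (n : Int)) k = 0 := by
            apply pv_mod_eq_of _ _ _ hk0 _ le_rfl hk0
            rw [← hcase, hteq]
            simpa using pv_dvd_sub_mod i k hk0
          rw [h0, sub_zero, show i = ((hist.length : Int)) by omega, pvH_append_last]
        · rw [if_neg hcase]
          have hub := pv_mod_bounds (i - (n : Int)) k hk0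
          have hu0 : PySem.Int.mod (i - (n : Int)) k ≠ 0 := by
            intro h0
            apply hcase
            have : PySem.Int.mod i k = (n : Int) := by
              apply pv_mod_eq_of _ _ _ hk0 _ (by omega) (by omega)
              have := (pv_mod_eq_iff (i - (n : Int)) 0 k hk0).mp
                (by rw [h0, pv_mod_small 0 k hk0 le_rfl hk0])
              simpa using this
            omega
          have hmn : PySem.Int.mod ((m : Int) - (n : Int)) k
              = PySem.Int.mod (i - (n : Int)) k - 1 := by
            apply pv_mod_eq_of _ _ _ hk0 _ (by omega) (by omega)
            have hdd : (m : Int) - (n : Int) - (PySem.Int.mod (i - (n : Int)) k - 1)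
                = (i - (n : Int)) - PySem.Int.mod (i - (n : Int)) k := by rw [hi]; ring
            rw [hdd]
            exact pv_dvd_sub_mod (i - (n : Int)) k hk0
          rw [← List.getD_eq_getElem _ 0 hnA, hA _ hnK, hmn,
            pvH_append _ _ _ (by omega)]
          congr 1
          rw [hi]; ring

-- ===== VERDICT (by name: the statement is the Claim_ definition above) =====
theorem climb_stairs_ksteps_paths_optimized_spec : Claim_unchanged_climb_stairs_ksteps_paths_optimized := by
  intro stairs k hdom hpre
  unfold Spec_climb_stairs_ksteps_paths_optimized
  intro hnd
  by_cases h0 : stairs = 0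
  · subst h0
    norm_num [climb_stairs_ksteps_paths_optimized, climb_stairs_ksteps_paths_optimized_alt]
  by_cases h1 : stairs = 1
  · subst h1
    norm_num [climb_stairs_ksteps_paths_optimized, climb_stairs_ksteps_paths_optimized_alt]
  have hk : 1 ≤ k := by
    rcases hpre with h | h | h
    · exact absurd h h0
    · exact absurd h h1
    · exact h
  have hk0 : (0 : Int) < k := by omega
  by_cases hneg : stairs < 0
  · -- negative stairs outside D_: both sides are 0
    have hu := pv_mod_bounds stairs k hk0
    have hu0 : PySem.Int.mod stairs k ≠ 0 := by
      rw [Ne, PySem.Int.mod_eq_zero_iff_dvd]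
      exact fun hd => (hnd ⟨hneg, hd⟩)
    have hB : climb_stairs_ksteps_paths_optimized_alt stairs k = 0 := by
      unfold climb_stairs_ksteps_paths_optimized_alt
      rw [if_pos (by omega), if_neg (by omega)]
    have hA : climb_stairs_ksteps_paths_optimized stairs k = 0 := by
      unfold climb_stairs_ksteps_paths_optimized
      rw [if_neg h0, if_neg h1]
      show PySem.List.pyGetD
        ((PySem.List.pyRange 1 (stairs + 1) 1).foldl (pvStepA k)
          (PySem.List.pySetD (List.replicate k.toNat 0) 0 1))
        (PySem.Int.mod stairs k) 0 = 0
      rw [PySem.List.pyRange_one_eq_nil (by omega), List.foldl_nil,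
        PySem.List.pySetD_of_nonneg _ _ le_rfl,
        PySem.List.pyGetD_of_nonneg _ _ hu.1,
        pv_getD_set_ne _ _ _ _ (by omega)]
      simp only [List.getD, List.getElem?_replicate]
      rw [if_pos (show (PySem.Int.mod stairs k).toNat < k.toNat by omega)]
      rfl
    rw [hA, hB]
  · -- stairs ≥ 2
    have hN : stairs = ((stairs.toNat : Nat) : Int) := (Int.toNat_of_nonneg (by omega)).symm
    set N := stairs.toNat with hNdef
    obtain ⟨h1l, h2w, h3a⟩ := pv_inv k hk N
    have hub := pv_mod_bounds ((N : Int)) k hk0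
    have hA : climb_stairs_ksteps_paths_optimized stairs k = (pvB k N).1.getD N 0 := by
      unfold climb_stairs_ksteps_paths_optimized
      rw [if_neg h0, if_neg h1]
      show PySem.List.pyGetD
        ((PySem.List.pyRange 1 (stairs + 1) 1).foldl (pvStepA k)
          (PySem.List.pySetD (List.replicate k.toNat 0) 0 1))
        (PySem.Int.mod stairs k) 0 = _
      rw [hN]
      rw [pv_foldl_pyRange_iter]
      show PySem.List.pyGetD (pvA k N) (PySem.Int.mod (N : Int) k) 0 = _
      rw [PySem.List.pyGetD_of_nonneg _ _ hub.1, h3a,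
        PySem.List.getD_map_range _ _ _ _ (by omega)]
      have hmz : PySem.Int.mod ((N : Int) - ((PySem.Int.mod (N : Int) k).toNat : Int)) k = 0 := by
        apply pv_mod_eq_of _ _ _ hk0 _ le_rfl hk0
        rw [Int.toNat_of_nonneg hub.1]
        simpa using pv_dvd_sub_mod (N : Int) k hk0
      rw [hmz, sub_zero, pvH, if_neg (by omega)]
      norm_num
    have hB : climb_stairs_ksteps_paths_optimized_alt stairs k = (pvB k N).1.getD N 0 := by
      unfold climb_stairs_ksteps_paths_optimized_alt
      rw [if_neg (by omega)]
      show PySem.List.pyGetD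
        ((PySem.List.pyRange 1 (stairs + 1) 1).foldl (pvStepB k) ([1], 1)).1 stairs 0 = _
      rw [hN, pv_foldl_pyRange_iter]
      show PySem.List.pyGetD (pvB k N).1 ((N : Int)) 0 = _
      rw [PySem.List.pyGetD_of_nonneg _ _ (by omega)]
      norm_num
    rw [hA, hB]

theorem climb_stairs_ksteps_paths_optimized_changed : Claim_changed_climb_stairs_ksteps_paths_optimized := by
  unfold Claim_changed_climb_stairs_ksteps_paths_optimized; decide

theorem climb_stairs_ksteps_paths_optimized_tight : Claim_exact_climb_stairs_ksteps_paths_optimized := by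
  unfold Claim_exact_climb_stairs_ksteps_paths_optimized
  intro stairs k hdom hpre hd
  obtain ⟨hneg, hdvd⟩ := hd
  have hk : 1 ≤ k := by
    rcases hpre with h | h | h
    · omega
    · omega
    · exact h
  have hk0 : (0 : Int) < k := by omega
  have hA : climb_stairs_ksteps_paths_optimized stairs k = 1 := by
    unfold climb_stairs_ksteps_paths_optimized
    rw [if_neg (by omega), if_neg (by omega)]
    show PySem.List.pyGetD
      ((PySem.List.pyRange 1 (stairs + 1) 1).foldl (pvStepA k)
        (PySem.List.pySetD (List.replicate k.toNat 0) 0 1))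
      (PySem.Int.mod stairs k) 0 = 1
    have hm0 : PySem.Int.mod stairs k = 0 := (PySem.Int.mod_eq_zero_iff_dvd _ _).mpr hdvd
    rw [PySem.List.pyRange_one_eq_nil (by omega), List.foldl_nil, hm0,
      PySem.List.pySetD_of_nonneg _ _ le_rfl,
      PySem.List.pyGetD_of_nonneg _ _ le_rfl,
      pv_getD_set_self _ _ _ (by simp; omega)]
  have hB : climb_stairs_ksteps_paths_optimized_alt stairs k = 0 := by
    unfold climb_stairs_ksteps_paths_optimized_alt
    rw [if_pos (by omega), if_neg (by omega)]
  rw [hA, hB]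
  norm_num
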